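-- pv_equiv track=rewrite | github.com/Vakul18/LeetCode | gfg-google-meta-ques/group_shifted_string.py | groupShiftedString
-- ===== SOURCE A (Python) =====
-- from collections import defaultdict
--
-- def groupShiftedString(arr):
--   dict = defaultdict(list)
--
--   for s in arr:
--     disp = ord(s[0]) - ord('a')
--     base_char = []
--     for c in s:
--       c_d = ord(c) - disp
--       if c_d < ord('a'):
--         c_d += 26
--
--       base_char.append(chr(c_d))
--     base_str = ''.join(base_char)
--     dict[base_str].append(s)
--
--   return list(dict.values())
-- ===== SOURCE B (Python) =====
-- def _key(s):
--     b = ord(s[0])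
--     return tuple(d + 26 if d < 0 else d for d in (ord(c) - b for c in s))
--
-- def groupShiftedString(arr):
--     keys = [_key(s) for s in arr]
--     seen = []
--     for k in keys:
--         if k not in seen:
--             seen.append(k)
--     return [[s for s, k2 in zip(arr, keys) if k2 == k] for k in seen]
-- ===== Notes on version B (the rewrite author's own statement) =====
-- stated objective: alternative
-- what changed: Replaces the per-string shift-to-base-string normalization plus defaultdict grouping with a numeric difference-from-first-char key (wrapped by +26 when negative), an explicit first-occurrence dedup of the key list, and groups rebuilt by scanning the input once per distinct key instead of appending into a dict.
import Mathlib
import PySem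

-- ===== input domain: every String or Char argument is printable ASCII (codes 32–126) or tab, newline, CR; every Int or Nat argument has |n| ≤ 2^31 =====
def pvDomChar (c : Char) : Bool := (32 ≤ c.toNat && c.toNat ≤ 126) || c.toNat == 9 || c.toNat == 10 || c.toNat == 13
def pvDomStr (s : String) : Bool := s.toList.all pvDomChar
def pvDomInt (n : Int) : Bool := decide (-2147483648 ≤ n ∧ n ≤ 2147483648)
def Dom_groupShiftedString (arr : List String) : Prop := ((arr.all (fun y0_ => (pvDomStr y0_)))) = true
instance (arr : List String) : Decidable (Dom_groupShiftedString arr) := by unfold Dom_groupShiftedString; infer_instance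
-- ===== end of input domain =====

-- B groups by a numeric difference-from-first-char key and rebuilds each group by scanning the
-- input per distinct key, instead of A's shift-to-base-string normalization into a defaultdict.

-- ===== PORT A =====
-- base string of s (A's inner loop); on the empty string Python raises IndexError at s[0]
-- (excluded by Pre_), here the [] branch is arbitrary.
def pvBaseStrA (s : String) : String :=
  match s.toList with
  | [] => ""
  | c0 :: _ =>
    let disp : Int := (c0.toNat : Int) - 97
    String.ofList (s.toList.map (fun c =>
      let cd : Int := (c.toNat : Int) - disp
      let cd : Int := if cd < 97 then cd + 26 else cd
      Char.ofNat cd.toNat))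

def groupShiftedString (arr : List String) : List (List String) :=
  (arr.foldl (fun d s => d.modify (pvBaseStrA s) [] (fun l => l ++ [s]))
    (PySem.Dict.empty : PySem.Dict String (List String))).values

-- ===== PORT B =====
-- difference key of s; on the empty string Python raises IndexError at s[0] (excluded by Pre_).
def pvKeyB (s : String) : List Int :=
  match s.toList with
  | [] => []
  | c0 :: _ =>
    s.toList.map (fun c =>
      let d : Int := (c.toNat : Int) - (c0.toNat : Int)
      if d < 0 then d + 26 else d)

def groupShiftedString_alt (arr : List String) : List (List String) :=
  let keys := arr.map pvKeyB
  let seen := keys.foldl (fun acc k => if k ∈ acc then acc else acc ++ [k]) ([] : List (List Int))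
  seen.map (fun k => ((arr.zip keys).filter (fun p => p.2 == k)).map (·.1))

-- ===== PRECONDITION & SPEC =====
-- Pre_ excludes exactly the inputs containing an empty string, on which A raises IndexError at s[0].
def Pre_groupShiftedString (arr : List String) : Prop := ∀ s ∈ arr, s ≠ ""
instance (arr : List String) : Decidable (Pre_groupShiftedString arr) := by unfold Pre_groupShiftedString; infer_instance

def pvWitness_groupShiftedString : List String := ["abc", "bcd", "xyz", "az", "ba", "a!c"]

def Spec_groupShiftedString (arr : List String) (out : List (List String)) : Prop := out = groupShiftedString_alt arr
instance (arr : List String) (out : List (List String)) : Decidable (Spec_groupShiftedString arr out) := by unfold Spec_groupShiftedString; infer_instance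

-- ===== CLAIM (what is proved, stated in full; the proofs are below) =====
def Claim_equal_groupShiftedString : Prop := ∀ (arr : List String), Dom_groupShiftedString arr → Pre_groupShiftedString arr → Spec_groupShiftedString arr (groupShiftedString arr)

-- ===== LEMMAS AND PROOFS =====

-- the injective encoding relating B's key to A's key: A's base character for difference d is chr(d + 97)
def pvEnc (k : List Int) : String := String.ofList (k.map (fun d => Char.ofNat (d + 97).toNat))

-- common group-by-key normal form of both ports: distinct keys in first-occurrence order,
-- each mapped to the sublist of arr carrying that key
def pvGroups {κ : Type} [BEq κ] (key : String → κ) (arr : List String) : List (List String) :=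
  (PySem.Set.ofList (arr.map key)).map (fun k => arr.filter (fun s => key s == k))

lemma A_normal (arr : List String) :
    groupShiftedString arr = pvGroups pvBaseStrA arr := by
  unfold groupShiftedString pvGroups
  rw [PySem.Dict.values_eq_map_keys _
      (PySem.Dict.nodup_keys_foldl_modify_key arr pvBaseStrA [] (fun _ s _l => _l ++ [s]) _
        PySem.Dict.nodup_keys_empty) []]
  rw [PySem.Dict.keys_foldl_modify_key arr pvBaseStrA [] (fun _ s l => l ++ [s])]
  rw [PySem.Dict.keys_empty, PySem.Set.update_nil_left]
  apply List.map_congr_left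
  intro k _
  have h : (arr.foldl (fun d s => d.modify (pvBaseStrA s) [] (fun l => l ++ [s]))
      (PySem.Dict.empty : PySem.Dict String (List String)))
    = ((arr.map (fun s => (pvBaseStrA s, s))).foldl
        (fun d p => d.modify p.1 [] (fun l => l ++ [p.2])) PySem.Dict.empty) := by
    rw [List.foldl_map]
  rw [h, PySem.Dict.getD_foldl_modify_append]
  rw [List.filter_map]
  simp only [List.map_map]
  rw [show ((fun p : String × String => p.1 == k) ∘ fun s => (pvBaseStrA s, s)) = (fun s => pvBaseStrA s == k) from rfl]
  simp [Function.comp_def]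

lemma zip_map_self {α β : Type} (f : α → β) (l : List α) :
    l.zip (l.map f) = l.map (fun s => (s, f s)) := by
  induction l with
  | nil => rfl
  | cons x xs ih => simp [ih]

lemma B_normal (arr : List String) :
    groupShiftedString_alt arr = pvGroups pvKeyB arr := by
  unfold groupShiftedString_alt pvGroups
  dsimp only
  have hseen : (arr.map pvKeyB).foldl (fun acc k => if k ∈ acc then acc else acc ++ [k]) [] =
      PySem.Set.ofList (arr.map pvKeyB) := by
    rw [PySem.Set.ofList_eq_foldl]
    congr 1
    funext acc x
    rw [PySem.Set.add_eq_ite]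
  rw [hseen]
  apply List.map_congr_left
  intro k _
  rw [zip_map_self pvKeyB arr]
  rw [List.filter_map, List.map_map]
  rw [show ((fun p : String × List Int => p.2 == k) ∘ fun s => (s, pvKeyB s)) = (fun s => pvKeyB s == k) from rfl]
  simp [Function.comp_def]

-- A's base character and B's key entry agree pointwise: base char = chr(key entry + 97)
lemma key_rel (s : String) : pvBaseStrA s = pvEnc (pvKeyB s) := by
  unfold pvBaseStrA pvKeyB pvEnc
  cases h : s.toList with
  | nil => rfl
  | cons c0 rest =>
    simp only [List.map_map]
    congr 1
    apply List.map_congr_left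
    intro c _
    simp only [Function.comp]
    congr 1
    split_ifs <;> omega

lemma char_bounds (s : String) (hs : pvDomStr s = true) :
    ∀ d ∈ pvKeyB s, 0 ≤ d + 97 ∧ d + 97 < 55296 := by
  unfold pvKeyB
  cases h : s.toList with
  | nil => simp
  | cons c0 rest =>
    intro d hd
    simp only [List.mem_map] at hd
    obtain ⟨c, hc, rfl⟩ := hd
    have hcd : pvDomChar c = true := (List.all_eq_true.mp hs) c (by rw [h] at *; exact hc)
    have hc0 : pvDomChar c0 = true :=
      (List.all_eq_true.mp hs) c0 (by rw [h]; exact List.mem_cons_self ..)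
    simp only [pvDomChar, Bool.or_eq_true, Bool.and_eq_true, decide_eq_true_eq, beq_iff_eq] at hcd hc0
    split_ifs <;> omega

lemma enc_inj (a b : List Int)
    (ha : ∀ d ∈ a, 0 ≤ d + 97 ∧ d + 97 < 55296)
    (hb : ∀ d ∈ b, 0 ≤ d + 97 ∧ d + 97 < 55296)
    (h : pvEnc a = pvEnc b) : a = b := by
  unfold pvEnc at h
  have h' : a.map (fun d => Char.ofNat (d + 97).toNat) = b.map (fun d => Char.ofNat (d + 97).toNat) := by
    have h2 := congrArg String.toList h
    rwa [String.toList_ofList, String.toList_ofList] at h2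
  clear h
  induction a generalizing b with
  | nil => cases b <;> simp_all
  | cons x xs ih =>
    cases b with
    | nil => simp_all
    | cons y ys =>
      simp only [List.map_cons, List.cons.injEq] at h'
      obtain ⟨h1, h2⟩ := h'
      have hx := ha x (by simp)
      have hy := hb y (by simp)
      have hxn : (Char.ofNat (x + 97).toNat).toNat = (x + 97).toNat := by
        rw [Char.toNat_ofNat]
        have hv : ((x + 97).toNat).isValidChar := by
          unfold Nat.isValidChar
          left; omega
        simp [hv]
      have hyn : (Char.ofNat (y + 97).toNat).toNat = (y + 97).toNat := by
        rw [Char.toNat_ofNat]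
        have hv : ((y + 97).toNat).isValidChar := by
          unfold Nat.isValidChar
          left; omega
        simp [hv]
      have hxy : x = y := by
        have h3 := congrArg Char.toNat h1
        rw [hxn, hyn] at h3
        omega
      subst hxy
      rw [ih ys (fun d hd => ha d (List.mem_cons_of_mem _ hd))
            (fun d hd => hb d (List.mem_cons_of_mem _ hd)) h2]

lemma ofList_map_injOn {α β : Type} [BEq α] [LawfulBEq α] [BEq β] [LawfulBEq β]
    (f : α → β) (l : List α) (hinj : ∀ x ∈ l, ∀ y ∈ l, f x = f y → x = y) :
    PySem.Set.ofList (l.map f) = (PySem.Set.ofList l).map f := by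
  induction l with
  | nil => rfl
  | cons x xs ih =>
    rw [List.map_cons, PySem.Set.ofList_cons, PySem.Set.ofList_cons, List.map_cons]
    congr 1
    rw [ih (fun a ha b hb => hinj a (by simp [ha]) b (by simp [hb]))]
    unfold PySem.Set.discard
    rw [List.filter_map]
    congr 1
    apply List.filter_congr
    intro z hz
    have hzxs : z ∈ xs := (PySem.Set.mem_ofList xs z).mp hz
    simp only [Function.comp]
    congr 1
    rw [Bool.eq_iff_iff]
    simp only [beq_iff_eq]
    exact ⟨fun h => hinj z (by simp [hzxs]) x (by simp) h, fun h => h ▸ rfl⟩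

lemma keyB_bounds_of_dom (arr : List String) (hdom : Dom_groupShiftedString arr) :
    ∀ s ∈ arr, ∀ d ∈ pvKeyB s, 0 ≤ d + 97 ∧ d + 97 < 55296 := by
  intro s hs
  exact char_bounds s ((List.all_eq_true.mp hdom) s hs)

lemma groups_eq (arr : List String) (hdom : Dom_groupShiftedString arr) :
    pvGroups pvBaseStrA arr = pvGroups pvKeyB arr := by
  have hb := keyB_bounds_of_dom arr hdom
  have hmapA : arr.map pvBaseStrA = (arr.map pvKeyB).map pvEnc := by
    rw [List.map_map]
    exact List.map_congr_left (fun s _ => key_rel s)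
  have hinj : ∀ x ∈ arr.map pvKeyB, ∀ y ∈ arr.map pvKeyB, pvEnc x = pvEnc y → x = y := by
    intro x hx y hy hxy
    obtain ⟨sx, hsx, rfl⟩ := List.mem_map.mp hx
    obtain ⟨sy, hsy, rfl⟩ := List.mem_map.mp hy
    exact enc_inj _ _ (hb sx hsx) (hb sy hsy) hxy
  unfold pvGroups
  rw [hmapA, ofList_map_injOn pvEnc (arr.map pvKeyB) hinj, List.map_map]
  apply List.map_congr_left
  intro k hk
  have hkarr : k ∈ arr.map pvKeyB := (PySem.Set.mem_ofList _ _).mp hk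
  simp only [Function.comp]
  apply List.filter_congr
  intro s hs
  rw [key_rel s]
  rw [Bool.eq_iff_iff]
  simp only [beq_iff_eq]
  exact ⟨fun h => hinj _ (List.mem_map_of_mem hs) _ hkarr h, fun h => h ▸ rfl⟩

-- ===== VERDICT (by name: the statement is the Claim_ definition above) =====
theorem groupShiftedString_spec : Claim_equal_groupShiftedString := by
  intro arr hdom _hpre
  unfold Spec_groupShiftedString
  rw [A_normal, B_normal, groups_eq arr hdom]
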